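-- pv_equiv track=rewrite | github.com/lach-killerpythons/video-snake | file-crawl.py | tidy_name
-- ===== SOURCE A (Python) =====
-- def tidy_name(input: str):
--     spaced = False
--     output = ""
--     for c in input:
--         if c != ' ' and c!= "\'":
--             output += c
--         else:
--             spaced = True
--             output += '.'
--     return spaced, output
-- ===== SOURCE B (Python) =====
-- def tidy_name(input: str):
--     output = input.translate(str.maketrans({' ': '.', "'": '.'}))
--     return output != input, output
-- ===== Notes on version B (the rewrite author's own statement) =====
-- stated objective: idiomatic
-- what changed: B replaces the per-character loop with its maintained spaced-flag accumulator by one whole-string str.translate substitution of the two target characters, deriving the flag afterwards by comparing output with input.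
import Mathlib
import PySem

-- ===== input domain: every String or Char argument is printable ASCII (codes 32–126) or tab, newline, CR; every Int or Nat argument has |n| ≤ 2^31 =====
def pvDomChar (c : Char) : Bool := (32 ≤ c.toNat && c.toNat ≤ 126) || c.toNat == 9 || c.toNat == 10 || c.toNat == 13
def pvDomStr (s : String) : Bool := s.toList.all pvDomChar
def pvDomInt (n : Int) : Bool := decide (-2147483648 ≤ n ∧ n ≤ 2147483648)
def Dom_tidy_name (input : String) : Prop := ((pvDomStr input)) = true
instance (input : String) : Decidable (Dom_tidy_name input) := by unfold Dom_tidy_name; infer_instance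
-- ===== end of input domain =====

-- B replaces A's per-character loop (with its maintained 'spaced' flag) by one whole-string
-- translation mapping ' ' and '\'' to '.', deriving the flag afterwards as output ≠ input.

-- ===== PORT A =====
def tidy_name (input : String) : Bool × String :=
  let st := input.toList.foldl
    (fun (st : Bool × List Char) c =>
      if c ≠ ' ' ∧ c ≠ '\'' then (st.1, st.2 ++ [c])
      else (true, st.2 ++ ['.'])) (false, [])
  (st.1, String.ofList st.2)

-- ===== PORT B =====
-- the translation table: only ' ' and '\'' map to '.', every other char to itself
def tidyTrans (c : Char) : Char := if c = ' ' ∨ c = '\'' then '.' else c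

def tidy_name_alt (input : String) : Bool × String :=
  let output := String.ofList (input.toList.map tidyTrans)
  (decide (output ≠ input), output)

-- ===== PRECONDITION & SPEC =====
def Spec_tidy_name (input : String) (out : Bool × String) : Prop := out = tidy_name_alt input
instance (input : String) (out : Bool × String) : Decidable (Spec_tidy_name input out) := by unfold Spec_tidy_name; infer_instance

-- ===== CLAIM (what is proved, stated in full; the proofs are below) =====
def Claim_equal_tidy_name : Prop := ∀ (input : String), Dom_tidy_name input → Spec_tidy_name input (tidy_name input)

-- ===== LEMMAS AND PROOFS =====

lemma tidy_foldl (l : List Char) (b : Bool) (acc : List Char) :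
    l.foldl (fun (st : Bool × List Char) c =>
      if c ≠ ' ' ∧ c ≠ '\'' then (st.1, st.2 ++ [c])
      else (true, st.2 ++ ['.'])) (b, acc)
    = (b || l.any (fun c => c = ' ' ∨ c = '\''), acc ++ l.map tidyTrans) := by
  induction l generalizing b acc with
  | nil => simp
  | cons c l ih =>
    by_cases h : c = ' ' ∨ c = '\''
    · simp only [List.foldl_cons, List.any_cons, List.map_cons]
      rw [if_neg (by tauto)]
      rw [ih]
      simp [tidyTrans, h]
    · push Not at h
      simp only [List.foldl_cons, List.any_cons, List.map_cons]
      rw [if_pos (by tauto)]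
      rw [ih]
      simp [tidyTrans, h.1, h.2]

lemma tidy_map_eq (l : List Char) :
    (l.map tidyTrans = l) ↔ l.any (fun c => c = ' ' ∨ c = '\'') = false := by
  induction l with
  | nil => simp
  | cons c l ih =>
    simp only [List.map_cons, List.cons.injEq, List.any_cons, Bool.or_eq_false_iff]
    constructor
    · rintro ⟨h1, h2⟩
      refine ⟨?_, ih.mp h2⟩
      by_contra hb
      simp only [decide_eq_false_iff_not, not_not] at hb
      unfold tidyTrans at h1
      rw [if_pos hb] at h1
      rcases hb with hb | hb <;> simp [hb] at h1
    · rintro ⟨h1, h2⟩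
      simp only [decide_eq_false_iff_not] at h1
      exact ⟨by simp [tidyTrans, h1], ih.mpr h2⟩

-- ===== VERDICT (by name: the statement is the Claim_ definition above) =====
theorem tidy_name_spec : Claim_equal_tidy_name := by
  intro input _
  unfold Spec_tidy_name tidy_name tidy_name_alt
  rw [tidy_foldl]
  simp only [Bool.false_or, List.nil_append]
  refine Prod.ext ?_ rfl
  simp only
  have hid : String.ofList input.toList = input := String.ofList_toList
  have hmk : (String.ofList (input.toList.map tidyTrans) ≠ input) ↔ ¬ (input.toList.map tidyTrans = input.toList) := by
    constructor
    · intro h hc; exact h (by rw [hc, hid])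
    · intro h hc
      exact h (by simpa [String.toList_ofList] using congrArg String.toList hc)
  rcases hany : input.toList.any (fun c => c = ' ' ∨ c = '\'') with _ | _
  · simp [(tidy_map_eq _).mpr hany, hid]
  · have : ¬ (input.toList.map tidyTrans = input.toList) := by
      intro hc; rw [(tidy_map_eq _).mp hc] at hany; cases hany
    simp [hmk, this]
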